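-- pv_equiv track=rewrite | github.com/Ashiq-am/Path-of-Python | 3.Data Types/Arrays Set 1 and Set 2/Prefix Sum/Maximize sum of given array after removing valleys/Maximize sum of given array after removing valleys.py | solve
-- ===== SOURCE A (Python) =====
-- def solve(arr):
-- 	n = len(arr)
-- 	left = [0]*(n)
-- 	right = [0]*(n)
-- 	stack = []
--
-- 	# Calculate left array
-- 	for i in range(n):
-- 		curr = arr[i]
-- 		while(stack and
-- 			arr[stack[-1]] >= curr):
-- 			stack.pop()
--
-- 		# Case 1
-- 		if (len(stack) == 0):
-- 			left[i] = (i + 1)*(arr[i])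
--
-- 		# Case 2
-- 		else:
-- 			small_idx = stack[-1]
-- 			left[i] = left[small_idx] \
-- 					+ (i - small_idx)*(arr[i])
-- 		stack.append(i)
--
-- 	stack.clear()
--
-- 	# Calculate suffix sum array
-- 	for i in range(n-1, -1, -1):
-- 		curr = arr[i]
-- 		while(stack and
-- 			arr[stack[-1]] >= curr):
-- 			stack.pop()
--
-- 		if (len(stack) == 0):
-- 			right[i] = (n-i)*(arr[i])
--
-- 		else:
-- 			small_idx = stack[-1]
-- 			right[i] = right[small_idx] \
-- 					+ (small_idx - i)*(arr[i])
--
-- 		stack.append(i)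
--
-- 	ans = 0
--
-- 	for i in range(n):
-- 		curr = left[i] + right[i] - arr[i]
-- 		ans = max(ans, curr)
--
-- 	return (ans)
-- ===== SOURCE B (Python) =====
-- def solve(arr):
--     # Kruskal-style interval merging: insert positions in decreasing value order;
--     # each maximal run of inserted positions keeps its length and its best
--     # mountain sum at its two endpoints, merged in O(1) per insertion.
--     n = len(arr)
--     size = [0] * n
--     best = [0] * n
--     for k in sorted(range(n), key=lambda i: arr[i], reverse=True):
--         v = arr[k]
--         szL = size[k - 1] if k > 0 else 0
--         szR = size[k + 1] if k + 1 < n else 0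
--         b = v * (szL + szR + 1)
--         if szL > 0:
--             b = max(b, best[k - szL] + v * (szR + 1))
--         if szR > 0:
--             b = max(b, best[k + szR] + v * (szL + 1))
--         size[k - szL] = size[k + szR] = szL + szR + 1
--         best[k - szL] = best[k + szR] = b
--     return max(0, best[0]) if n > 0 else 0
-- ===== Notes on version B (the rewrite author's own statement) =====
-- stated objective: alternative
-- what changed: Replaces the two monotonic-stack passes (left/right arrays combined by l+r-x) with a single Kruskal-style sweep: positions are inserted in decreasing value order and maximal runs of inserted positions are merged in O(1), each run carrying its length and its best mountain sum at its endpoints; the answer is read off the final full run.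
import Mathlib
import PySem

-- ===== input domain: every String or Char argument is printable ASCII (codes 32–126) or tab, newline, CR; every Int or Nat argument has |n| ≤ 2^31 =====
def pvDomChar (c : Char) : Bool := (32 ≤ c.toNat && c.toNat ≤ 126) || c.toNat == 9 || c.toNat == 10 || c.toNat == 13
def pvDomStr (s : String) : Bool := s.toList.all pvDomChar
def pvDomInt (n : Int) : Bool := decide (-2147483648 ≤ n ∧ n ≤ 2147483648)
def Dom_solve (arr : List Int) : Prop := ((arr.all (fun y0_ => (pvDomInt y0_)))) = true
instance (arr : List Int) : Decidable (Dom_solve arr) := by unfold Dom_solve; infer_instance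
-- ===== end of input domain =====

-- B replaces A's two monotonic-stack passes (left/right arrays combined by l+r-x) by a
-- Kruskal-style sweep: positions inserted in decreasing value order, maximal runs merged in
-- O(1) with length and best mountain sum kept at the run endpoints (objective: alternative).

-- ===== PORT A =====
-- Python list used as stack: stack[-1] is the head of our list (push = cons, pop = tail).
-- `while stack and arr[stack[-1]] >= curr: stack.pop()`
def popA (arr : List Int) (curr : Int) : List Nat → List Nat
  | [] => []
  | j :: s => if arr.getD j 0 ≥ curr then popA arr curr s else j :: s

-- first loop: `for i in range(n)` writing left[i]  (curr = arr[i] inlined as arr.getD i 0)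
def goLa (arr : List Int) (n : Nat) (i : Nat) (left : List Int) (stack : List Nat) : List Int :=
  if _h : i < n then
    goLa arr n (i + 1)
      (left.set i
        (match popA arr (arr.getD i 0) stack with
          | [] => ((i : Int) + 1) * arr.getD i 0
          | j :: _ => left.getD j 0 + ((i : Int) - (j : Int)) * arr.getD i 0))
      (i :: popA arr (arr.getD i 0) stack)
  else left
  termination_by n - i

-- second loop: `for i in range(n-1, -1, -1)` writing right[i]; called with k = n, step uses i = k-1
def goRa (arr : List Int) (n : Nat) : Nat → List Int → List Nat → List Int
  | 0, right, _ => right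
  | k + 1, right, stack =>
    goRa arr n k
      (right.set k
        (match popA arr (arr.getD k 0) stack with
          | [] => ((n : Int) - (k : Int)) * arr.getD k 0
          | j :: _ => right.getD j 0 + ((j : Int) - (k : Int)) * arr.getD k 0))
      (k :: popA arr (arr.getD k 0) stack)

def solve (arr : List Int) : Int :=
  (List.range arr.length).foldl
    (fun ans i =>
      max ans ((goLa arr arr.length 0 (List.replicate arr.length 0) []).getD i 0 +
               (goRa arr arr.length arr.length (List.replicate arr.length 0) []).getD i 0 -
               arr.getD i 0)) 0

-- ===== PORT B =====
-- `for k in sorted(range(n), key=lambda i: arr[i], reverse=True): …` — one merge step;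
-- the state is the pair (size, best); chained writes `size[a] = size[b] = w` are two pySetD.
def stepB (arr : List Int) (n : Int) (sb : List Int × List Int) (k : Int) : List Int × List Int :=
  let size := sb.1
  let best := sb.2
  let v := PySem.List.pyGetD arr k 0
  let szL := if k > 0 then PySem.List.pyGetD size (k - 1) 0 else 0
  let szR := if k + 1 < n then PySem.List.pyGetD size (k + 1) 0 else 0
  let b0 := v * (szL + szR + 1)
  let b1 := if szL > 0 then max b0 (PySem.List.pyGetD best (k - szL) 0 + v * (szR + 1)) else b0
  let b2 := if szR > 0 then max b1 (PySem.List.pyGetD best (k + szR) 0 + v * (szL + 1)) else b1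
  (PySem.List.pySetD (PySem.List.pySetD size (k - szL) (szL + szR + 1)) (k + szR) (szL + szR + 1),
   PySem.List.pySetD (PySem.List.pySetD best (k - szL) b2) (k + szR) b2)

def solve_alt (arr : List Int) : Int :=
  let n : Int := arr.length
  let st :=
    (PySem.List.sorted (PySem.List.pyRange 0 n 1) (fun i => PySem.List.pyGetD arr i 0) true).foldl
      (stepB arr n) (List.replicate arr.length 0, List.replicate arr.length 0)
  if n > 0 then max 0 (PySem.List.pyGetD st.2 0 0) else 0

-- ===== PRECONDITION & SPEC =====
def Spec_solve (arr : List Int) (out : Int) : Prop := out = solve_alt arr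
instance (arr : List Int) (out : Int) : Decidable (Spec_solve arr out) := by unfold Spec_solve; infer_instance

-- ===== CLAIM (what is proved, stated in full; the proofs are below) =====
def Claim_equal_solve : Prop := ∀ (arr : List Int), Dom_solve arr → Spec_solve arr (solve arr)

-- ===== LEMMAS AND PROOFS =====

-- ---------- the common specification: sums of window minima ----------

-- min of arr[a..b] (used with a ≤ b)
def wmin (arr : List Int) (a b : Nat) : Int :=
  if _h : a < b then min (arr.getD a 0) (wmin arr (a + 1) b) else arr.getD a 0
  termination_by b - a

-- Σ_{j=lo..hi} h j  (used with lo ≤ hi)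
def sumOver (h : Nat → Int) (lo hi : Nat) : Int :=
  if _h : lo < hi then h lo + sumOver h (lo + 1) hi else h hi
  termination_by hi - lo

-- max_{i=lo..hi} h i  (used with lo ≤ hi)
def maxOver (h : Nat → Int) (lo hi : Nat) : Int :=
  if _h : lo < hi then max (h lo) (maxOver h (lo + 1) hi) else h hi
  termination_by hi - lo

-- f(i) restricted to the segment [lo,hi]: Σ_{j=lo..hi} min(arr[min(i,j)..max(i,j)])
def fseg (arr : List Int) (i lo hi : Nat) : Int :=
  sumOver (fun j => wmin arr (min i j) (max i j)) lo hi

-- best mountain sum of the segment [lo,hi]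
def bestSeg (arr : List Int) (lo hi : Nat) : Int :=
  maxOver (fun i => fseg arr i lo hi) lo hi

def sumL (arr : List Int) (p : Nat) : Int := fseg arr p 0 p
def sumR (arr : List Int) (p : Nat) : Int := fseg arr p p (arr.length - 1)

-- ---------- generic lemmas about wmin / sumOver / maxOver ----------

theorem wmin_le (arr : List Int) (a b j : Nat) (h1 : a ≤ j) (h2 : j ≤ b) :
    wmin arr a b ≤ arr.getD j 0 := by
  have H : ∀ d a, b - a = d → a ≤ j → wmin arr a b ≤ arr.getD j 0 := by
    intro d
    induction d with
    | zero =>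
      intro a hd ha
      have : j = a := by omega
      subst this
      rw [wmin, dif_neg (by omega)]
    | succ d ih =>
      intro a hd ha
      rw [wmin, dif_pos (by omega)]
      by_cases hja : j = a
      · subst hja; exact min_le_left _ _
      · exact le_trans (min_le_right _ _) (ih (a + 1) (by omega) (by omega))
  exact H (b - a) a rfl h1

theorem le_wmin (arr : List Int) (a b : Nat) (v : Int) (hab : a ≤ b)
    (h : ∀ j, a ≤ j → j ≤ b → v ≤ arr.getD j 0) : v ≤ wmin arr a b := by
  have H : ∀ d a, b - a = d → a ≤ b → (∀ j, a ≤ j → j ≤ b → v ≤ arr.getD j 0) →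
      v ≤ wmin arr a b := by
    intro d
    induction d with
    | zero =>
      intro a hd ha hj
      rw [wmin, dif_neg (by omega)]
      exact hj a le_rfl (by omega)
    | succ d ih =>
      intro a hd ha hj
      rw [wmin, dif_pos (by omega)]
      exact le_min (hj a le_rfl (by omega))
        (ih (a + 1) (by omega) (by omega) (fun j h1 h2 => hj j (by omega) h2))
  exact H (b - a) a rfl hab h

theorem wmin_eq_of_argmin (arr : List Int) (a b k : Nat) (h1 : a ≤ k) (h2 : k ≤ b)
    (h : ∀ j, a ≤ j → j ≤ b → arr.getD k 0 ≤ arr.getD j 0) :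
    wmin arr a b = arr.getD k 0 := by
  exact le_antisymm (wmin_le arr a b k h1 h2) (le_wmin arr a b _ (le_trans h1 h2) h)

theorem wmin_split (arr : List Int) (a c b : Nat) (h1 : a ≤ c) (h2 : c < b) :
    wmin arr a b = min (wmin arr a c) (wmin arr (c + 1) b) := by
  have H : ∀ d a, c - a = d → a ≤ c →
      wmin arr a b = min (wmin arr a c) (wmin arr (c + 1) b) := by
    intro d
    induction d with
    | zero =>
      intro a hd ha
      have : a = c := by omega
      subst this
      rw [wmin, dif_pos (by omega)]
      rw [show wmin arr a a = arr.getD a 0 by rw [wmin, dif_neg (by omega)]]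
    | succ d ih =>
      intro a hd ha
      rw [wmin, dif_pos (by omega), ih (a + 1) (by omega) (by omega),
        show wmin arr a c = min (arr.getD a 0) (wmin arr (a + 1) c) by
          rw [wmin, dif_pos (by omega)]]
      rw [min_assoc]
  exact H (c - a) a rfl h1

theorem sumOver_split (h : Nat → Int) (lo c hi : Nat) (h1 : lo ≤ c) (h2 : c < hi) :
    sumOver h lo hi = sumOver h lo c + sumOver h (c + 1) hi := by
  have H : ∀ d lo, c - lo = d → lo ≤ c →
      sumOver h lo hi = sumOver h lo c + sumOver h (c + 1) hi := by
    intro d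
    induction d with
    | zero =>
      intro lo hd hlo
      have : lo = c := by omega
      subst this
      rw [sumOver, dif_pos (by omega),
        show sumOver h lo lo = h lo by rw [sumOver, dif_neg (by omega)]]
    | succ d ih =>
      intro lo hd hlo
      rw [sumOver, dif_pos (by omega), ih (lo + 1) (by omega) (by omega),
        show sumOver h lo c = h lo + sumOver h (lo + 1) c by
          rw [sumOver, dif_pos (by omega)]]
      ring
  exact H (c - lo) lo rfl h1

theorem sumOver_congr (h h' : Nat → Int) (lo hi : Nat) (hlohi : lo ≤ hi)
    (he : ∀ j, lo ≤ j → j ≤ hi → h j = h' j) : sumOver h lo hi = sumOver h' lo hi := by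
  have H : ∀ d lo, hi - lo = d → lo ≤ hi → (∀ j, lo ≤ j → j ≤ hi → h j = h' j) →
      sumOver h lo hi = sumOver h' lo hi := by
    intro d
    induction d with
    | zero =>
      intro lo hd hle hj
      rw [sumOver, dif_neg (by omega), sumOver, dif_neg (by omega)]
      exact hj hi (by omega) le_rfl
    | succ d ih =>
      intro lo hd hle hj
      rw [sumOver, dif_pos (by omega),
        show sumOver h' lo hi = h' lo + sumOver h' (lo + 1) hi from by
          rw [sumOver, dif_pos (by omega)],
        hj lo le_rfl (by omega),
        ih (lo + 1) (by omega) (by omega) (fun j h1 h2 => hj j (by omega) h2)]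
  exact H (hi - lo) lo rfl hlohi he

theorem sumOver_const (v : Int) (lo hi : Nat) (hle : lo ≤ hi) :
    sumOver (fun _ => v) lo hi = ((hi : Int) + 1 - lo) * v := by
  have H : ∀ d lo, hi - lo = d → lo ≤ hi →
      sumOver (fun _ => v) lo hi = ((hi : Int) + 1 - lo) * v := by
    intro d
    induction d with
    | zero =>
      intro lo hd hlo
      have : lo = hi := by omega
      subst this
      rw [sumOver, dif_neg (by omega)]
      ring
    | succ d ih =>
      intro lo hd hlo
      rw [sumOver, dif_pos (by omega), ih (lo + 1) (by omega) (by omega)]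
      push_cast
      ring
  exact H (hi - lo) lo rfl hle

theorem maxOver_congr (h h' : Nat → Int) (lo hi : Nat) (hlohi : lo ≤ hi)
    (he : ∀ j, lo ≤ j → j ≤ hi → h j = h' j) : maxOver h lo hi = maxOver h' lo hi := by
  have H : ∀ d lo, hi - lo = d → lo ≤ hi → (∀ j, lo ≤ j → j ≤ hi → h j = h' j) →
      maxOver h lo hi = maxOver h' lo hi := by
    intro d
    induction d with
    | zero =>
      intro lo hd hle hj
      rw [maxOver, dif_neg (by omega), maxOver, dif_neg (by omega)]
      exact hj hi (by omega) le_rfl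
    | succ d ih =>
      intro lo hd hle hj
      rw [maxOver, dif_pos (by omega),
        show maxOver h' lo hi = max (h' lo) (maxOver h' (lo + 1) hi) from by
          rw [maxOver, dif_pos (by omega)],
        hj lo le_rfl (by omega),
        ih (lo + 1) (by omega) (by omega) (fun j h1 h2 => hj j (by omega) h2)]
  exact H (hi - lo) lo rfl hlohi he

theorem maxOver_split (h : Nat → Int) (lo c hi : Nat) (h1 : lo ≤ c) (h2 : c < hi) :
    maxOver h lo hi = max (maxOver h lo c) (maxOver h (c + 1) hi) := by
  have H : ∀ d lo, c - lo = d → lo ≤ c →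
      maxOver h lo hi = max (maxOver h lo c) (maxOver h (c + 1) hi) := by
    intro d
    induction d with
    | zero =>
      intro lo hd hlo
      have : lo = c := by omega
      subst this
      rw [maxOver, dif_pos (by omega),
        show maxOver h lo lo = h lo by rw [maxOver, dif_neg (by omega)]]
    | succ d ih =>
      intro lo hd hlo
      rw [maxOver, dif_pos (by omega), ih (lo + 1) (by omega) (by omega),
        show maxOver h lo c = max (h lo) (maxOver h (lo + 1) c) by
          rw [maxOver, dif_pos (by omega)]]
      rw [max_assoc]
  exact H (c - lo) lo rfl h1

theorem maxOver_add_const (h : Nat → Int) (c : Int) (lo hi : Nat) :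
    maxOver (fun i => h i + c) lo hi = maxOver h lo hi + c := by
  have H : ∀ d lo, hi - lo = d →
      maxOver (fun i => h i + c) lo hi = maxOver h lo hi + c := by
    intro d
    induction d with
    | zero =>
      intro lo hd
      rw [maxOver, dif_neg (by omega), maxOver, dif_neg (by omega)]
    | succ d ih =>
      intro lo hd
      rw [maxOver, dif_pos (by omega),
        show maxOver h lo hi = max (h lo) (maxOver h (lo + 1) hi) from by
          rw [maxOver, dif_pos (by omega)],
        ih (lo + 1) (by omega), max_add_add_right]
  exact H (hi - lo) lo rfl

theorem fseg_at_argmin (arr : List Int) (lo hi k : Nat) (h1 : lo ≤ k) (h2 : k ≤ hi)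
    (hm : ∀ j, lo ≤ j → j ≤ hi → arr.getD k 0 ≤ arr.getD j 0) :
    fseg arr k lo hi = ((hi : Int) + 1 - lo) * arr.getD k 0 := by
  unfold fseg
  rw [sumOver_congr _ (fun _ => arr.getD k 0) lo hi (le_trans h1 h2)
      (fun j hj1 hj2 => wmin_eq_of_argmin arr (min k j) (max k j) k
        (by omega) (by omega)
        (fun m hm1 hm2 => hm m (by omega) (by omega))),
    sumOver_const _ lo hi (le_trans h1 h2)]

theorem fseg_left_of_argmin (arr : List Int) (lo hi k i : Nat) (h1 : lo ≤ i) (h2 : i < k)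
    (h3 : k ≤ hi) (hm : ∀ j, lo ≤ j → j ≤ hi → arr.getD k 0 ≤ arr.getD j 0) :
    fseg arr i lo hi = fseg arr i lo (k - 1) + ((hi : Int) + 1 - k) * arr.getD k 0 := by
  unfold fseg
  rw [sumOver_split _ lo (k - 1) hi (by omega) (by omega)]
  have hkk : k - 1 + 1 = k := by omega
  rw [hkk]
  congr 1
  rw [sumOver_congr _ (fun _ => arr.getD k 0) k hi (by omega)
      (fun j hj1 hj2 => by
        have hmin : min i j = i := by omega
        have hmax : max i j = j := by omega
        rw [hmin, hmax]
        exact wmin_eq_of_argmin arr i j k (by omega) (by omega)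
          (fun m hm1 hm2 => hm m (by omega) (by omega))),
    sumOver_const _ k hi (by omega)]

theorem fseg_right_of_argmin (arr : List Int) (lo hi k i : Nat) (h1 : lo ≤ k) (h2 : k < i)
    (h3 : i ≤ hi) (hm : ∀ j, lo ≤ j → j ≤ hi → arr.getD k 0 ≤ arr.getD j 0) :
    fseg arr i lo hi = fseg arr i (k + 1) hi + ((k : Int) + 1 - lo) * arr.getD k 0 := by
  unfold fseg
  rw [sumOver_split _ lo k hi (by omega) (by omega)]
  rw [sumOver_congr _ (fun _ => arr.getD k 0) lo k (by omega)
      (fun j hj1 hj2 => by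
        have hmin : min i j = j := by omega
        have hmax : max i j = i := by omega
        rw [hmin, hmax]
        exact wmin_eq_of_argmin arr j i k (by omega) (by omega)
          (fun m hm1 hm2 => hm m (by omega) (by omega))),
    sumOver_const _ lo k (by omega)]
  ring

-- bestSeg of a segment whose minimum sits at k, as B's merge step computes it
theorem bestSeg_combine (arr : List Int) (lo hi k : Nat) (h1 : lo ≤ k) (h2 : k ≤ hi)
    (hm : ∀ j, lo ≤ j → j ≤ hi → arr.getD k 0 ≤ arr.getD j 0) :
    bestSeg arr lo hi =
      (let v := arr.getD k 0
       let b0 := v * (((hi : Int) + 1) - lo)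
       let b1 := if lo < k then max b0 (bestSeg arr lo (k - 1) + v * (((hi : Int) + 1) - k)) else b0
       if k < hi then max b1 (bestSeg arr (k + 1) hi + v * (((k : Int) + 1) - lo)) else b1) := by
  dsimp only
  have hv := fseg_at_argmin arr lo hi k h1 h2 hm
  by_cases hlo : lo < k
  · have hL : maxOver (fun i => fseg arr i lo hi) lo (k - 1) =
        bestSeg arr lo (k - 1) + arr.getD k 0 * (((hi : Int) + 1) - k) := by
      rw [maxOver_congr _ (fun i => fseg arr i lo (k - 1) + arr.getD k 0 * (((hi : Int) + 1) - k))
          lo (k - 1) (by omega)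
          (fun i hi1 hi2 => by
            rw [fseg_left_of_argmin arr lo hi k i hi1 (by omega) h2 hm]
            ring),
        maxOver_add_const]
      rfl
    by_cases hhi : k < hi
    · rw [if_pos hlo, if_pos hhi]
      have hR : maxOver (fun i => fseg arr i lo hi) (k + 1) hi =
          bestSeg arr (k + 1) hi + arr.getD k 0 * (((k : Int) + 1) - lo) := by
        rw [maxOver_congr _ (fun i => fseg arr i (k + 1) hi + arr.getD k 0 * (((k : Int) + 1) - lo))
            (k + 1) hi (by omega)
            (fun i hi1 hi2 => by
              rw [fseg_right_of_argmin arr lo hi k i h1 (by omega) hi2 hm]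
              ring),
          maxOver_add_const]
        rfl
      rw [show bestSeg arr lo hi = maxOver (fun i => fseg arr i lo hi) lo hi from rfl,
        maxOver_split _ lo (k - 1) hi (by omega) (by omega),
        show k - 1 + 1 = k from by omega,
        maxOver_split _ k k hi (le_rfl) (by omega),
        show maxOver (fun i => fseg arr i lo hi) k k = fseg arr k lo hi from by
          rw [maxOver, dif_neg (by omega)],
        hv, hL, hR,
        show arr.getD k 0 * (((hi : Int) + 1) - lo) = (((hi : Int) + 1) - lo) * arr.getD k 0 from by ring]
      rw [max_left_comm, ← max_assoc]
    · have hkhi : k = hi := by omega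
      rw [if_pos hlo, if_neg hhi]
      subst hkhi
      rw [show bestSeg arr lo k = maxOver (fun i => fseg arr i lo k) lo k from rfl,
        maxOver_split _ lo (k - 1) k (by omega) (by omega),
        show k - 1 + 1 = k from by omega,
        show maxOver (fun i => fseg arr i lo k) k k = fseg arr k lo k from by
          rw [maxOver, dif_neg (by omega)],
        hv, hL,
        show arr.getD k 0 * (((k : Int) + 1) - lo) = (((k : Int) + 1) - lo) * arr.getD k 0 from by ring]
      rw [max_comm]
  · have hklo : k = lo := by omega
    subst hklo
    rw [if_neg hlo]
    by_cases hhi : k < hi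
    · rw [if_pos hhi]
      have hR : maxOver (fun i => fseg arr i k hi) (k + 1) hi =
          bestSeg arr (k + 1) hi + arr.getD k 0 * (((k : Int) + 1) - k) := by
        rw [maxOver_congr _ (fun i => fseg arr i (k + 1) hi + arr.getD k 0 * (((k : Int) + 1) - k))
            (k + 1) hi (by omega)
            (fun i hi1 hi2 => by
              rw [fseg_right_of_argmin arr k hi k i le_rfl (by omega) hi2 hm]
              ring),
          maxOver_add_const]
        rfl
      rw [show bestSeg arr k hi = maxOver (fun i => fseg arr i k hi) k hi from rfl,
        maxOver_split _ k k hi le_rfl (by omega),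
        show maxOver (fun i => fseg arr i k hi) k k = fseg arr k k hi from by
          rw [maxOver, dif_neg (by omega)],
        hv, hR,
        show arr.getD k 0 * (((hi : Int) + 1) - k) = (((hi : Int) + 1) - k) * arr.getD k 0 from by ring]
    · have hkhi : k = hi := by omega
      rw [if_neg hhi]
      subst hkhi
      rw [show bestSeg arr k k = maxOver (fun i => fseg arr i k k) k k from rfl,
        show maxOver (fun i => fseg arr i k k) k k = fseg arr k k k from by
          rw [maxOver, dif_neg (by omega)],
        hv]
      ring

-- ---------- A-side: the stack passes compute sumL / sumR ----------

theorem getD_set_self (l : List Int) (i : Nat) (v d : Int) (h : i < l.length) :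
    (l.set i v).getD i d = v := by
  rw [List.getD_eq_getElem _ _ (by simpa using h)]
  simp

theorem getD_set_ne (l : List Int) (i j : Nat) (v d : Int) (h : j ≠ i) :
    (l.set i v).getD j d = l.getD j d := by
  simp [List.getD_eq_getElem?_getD, List.getElem?_set_ne (by omega : i ≠ j)]

-- the stack invariant of A's left pass, before processing index i
def InvL (arr : List Int) (i : Nat) (sa : List Nat) : Prop :=
  sa.Pairwise (· > ·) ∧
  (∀ j ∈ sa, j < i ∧ ∀ m, j < m → m < i → arr.getD j 0 < arr.getD m 0) ∧
  (∀ j, j < i → (∀ m, j < m → m < i → arr.getD j 0 < arr.getD m 0) → j ∈ sa)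

theorem invL_cover (arr : List Int) (i : Nat) (sa : List Nat) (hinv : InvL arr i sa) :
    ∀ m, m < i → ∃ j ∈ sa, m ≤ j ∧ arr.getD j 0 ≤ arr.getD m 0 := by
  obtain ⟨_, _, hcomp⟩ := hinv
  have H : ∀ d m, m < i → i - m ≤ d →
      ∃ j ∈ sa, m ≤ j ∧ arr.getD j 0 ≤ arr.getD m 0 := by
    intro d
    induction d with
    | zero => intro m hm hd; omega
    | succ d ih =>
      intro m hm hd
      by_cases hp : ∀ m', m < m' → m' < i → arr.getD m 0 < arr.getD m' 0
      · exact ⟨m, hcomp m hm hp, le_rfl, le_rfl⟩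
      · push_neg at hp
        obtain ⟨m', hmm', hm'i, hle⟩ := hp
        obtain ⟨j, hj, hj1, hj2⟩ := ih m' hm'i (by omega)
        exact ⟨j, hj, by omega, le_trans hj2 hle⟩
  intro m hm
  exact H (i - m) m hm le_rfl

theorem popA_suffix (arr : List Int) (x : Int) :
    ∀ sa : List Nat, popA arr x sa <:+ sa := by
  intro sa
  induction sa with
  | nil => simp [popA]
  | cons j s ih =>
    rw [popA]
    by_cases h : arr.getD j 0 ≥ x
    · rw [if_pos h]
      exact ih.trans (List.suffix_cons j s)
    · rw [if_neg h]

theorem popA_popped_ge (arr : List Int) (x : Int) :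
    ∀ sa : List Nat, ∀ m ∈ sa, m ∉ popA arr x sa → arr.getD m 0 ≥ x := by
  intro sa
  induction sa with
  | nil => simp
  | cons j s ih =>
    intro m hm hnm
    rw [popA] at hnm
    by_cases h : arr.getD j 0 ≥ x
    · rw [if_pos h] at hnm
      rcases List.mem_cons.mp hm with rfl | hm'
      · exact h
      · exact ih m hm' hnm
    · rw [if_neg h] at hnm
      exact absurd hm hnm

theorem popA_mem_of_lt (arr : List Int) (x : Int) :
    ∀ sa : List Nat, ∀ j ∈ sa, arr.getD j 0 < x → j ∈ popA arr x sa := by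
  intro sa
  induction sa with
  | nil => simp
  | cons j' s ih =>
    intro j hj hlt
    rw [popA]
    by_cases h : arr.getD j' 0 ≥ x
    · rw [if_pos h]
      rcases List.mem_cons.mp hj with rfl | hj'
      · omega
      · exact ih j hj' hlt
    · rw [if_neg h]
      exact hj

theorem popA_head_lt (arr : List Int) (x : Int) :
    ∀ sa : List Nat, ∀ t rest, popA arr x sa = t :: rest → arr.getD t 0 < x := by
  intro sa
  induction sa with
  | nil => intro t rest h; simp [popA] at h
  | cons j s ih =>
    intro t rest h
    rw [popA] at h
    by_cases hc : arr.getD j 0 ≥ x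
    · rw [if_pos hc] at h
      exact ih t rest h
    · rw [if_neg hc] at h
      cases h
      omega

-- after popping with curr = arr[i], every index strictly between the new top and i has value ≥ arr[i]
theorem popA_gap_cons (arr : List Int) (i : Nat) (sa : List Nat) (t : Nat) (rest : List Nat)
    (hinv : InvL arr i sa) (hpop : popA arr (arr.getD i 0) sa = t :: rest) :
    ∀ m, t < m → m < i → arr.getD i 0 ≤ arr.getD m 0 := by
  intro m hm1 hm2
  obtain ⟨j, hj, hj1, hj2⟩ := invL_cover arr i sa hinv m hm2
  have hjt : j ∉ popA arr (arr.getD i 0) sa := by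
    intro hjin
    rw [hpop] at hjin
    have hsuf := popA_suffix arr (arr.getD i 0) sa
    rw [hpop] at hsuf
    have hpw : (t :: rest).Pairwise (fun a b : Nat => a > b) := hinv.1.sublist hsuf.sublist
    rcases List.mem_cons.mp hjin with rfl | hjr
    · omega
    · have := (List.pairwise_cons.mp hpw).1 j hjr
      omega
  have := popA_popped_ge arr (arr.getD i 0) sa j hj hjt
  omega

theorem popA_gap_nil (arr : List Int) (i : Nat) (sa : List Nat)
    (hinv : InvL arr i sa) (hpop : popA arr (arr.getD i 0) sa = []) :
    ∀ m, m < i → arr.getD i 0 ≤ arr.getD m 0 := by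
  intro m hm
  obtain ⟨j, hj, hj1, hj2⟩ := invL_cover arr i sa hinv m hm
  have hjt : j ∉ popA arr (arr.getD i 0) sa := by rw [hpop]; simp
  have := popA_popped_ge arr (arr.getD i 0) sa j hj hjt
  omega

theorem invL_step (arr : List Int) (i : Nat) (sa : List Nat) (hinv : InvL arr i sa) :
    InvL arr (i + 1) (i :: popA arr (arr.getD i 0) sa) := by
  obtain ⟨hpw, hsound, hcomp⟩ := hinv
  have hsuf := popA_suffix arr (arr.getD i 0) sa
  have hpw' : (popA arr (arr.getD i 0) sa).Pairwise (fun a b : Nat => a > b) :=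
    hpw.sublist hsuf.sublist
  have hmem_lt : ∀ j ∈ popA arr (arr.getD i 0) sa, j < i := by
    intro j hj
    exact (hsound j (hsuf.subset hj)).1
  have hmem_val : ∀ j ∈ popA arr (arr.getD i 0) sa, arr.getD j 0 < arr.getD i 0 := by
    intro j hj
    match hp : popA arr (arr.getD i 0) sa with
    | [] => rw [hp] at hj; simp at hj
    | t :: rest =>
      rw [hp] at hj
      have ht : arr.getD t 0 < arr.getD i 0 := popA_head_lt arr _ sa t rest hp
      rcases List.mem_cons.mp hj with rfl | hjr
      · exact ht
      · have hjt : j < t := by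
          rw [hp] at hpw'
          exact (List.pairwise_cons.mp hpw').1 j hjr
        have hti : t < i := hmem_lt t (by rw [hp]; simp)
        have := (hsound j (hsuf.subset (by rw [hp]; exact List.mem_cons_of_mem _ hjr))).2 t hjt hti
        omega
  refine ⟨?_, ?_, ?_⟩
  · exact List.pairwise_cons.mpr ⟨fun j hj => hmem_lt j hj, hpw'⟩
  · intro j hj
    rcases List.mem_cons.mp hj with rfl | hjr
    · exact ⟨by omega, fun m hm1 hm2 => by omega⟩
    · refine ⟨by have := hmem_lt j hjr; omega, ?_⟩
      intro m hm1 hm2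
      by_cases hmi : m = i
      · subst hmi
        exact hmem_val j hjr
      · exact (hsound j (hsuf.subset hjr)).2 m hm1 (by omega)
  · intro j hji hjp
    by_cases hji' : j = i
    · subst hji'; exact List.mem_cons_self
    · have hjin : j ∈ sa := hcomp j (by omega) (fun m hm1 hm2 => hjp m hm1 (by omega))
      have : arr.getD j 0 < arr.getD i 0 := hjp i (by omega) (by omega)
      exact List.mem_cons_of_mem _ (popA_mem_of_lt arr _ sa j hjin this)

-- sumL recurrences
theorem sumL_of_min (arr : List Int) (p : Nat)
    (h : ∀ m, m < p → arr.getD p 0 ≤ arr.getD m 0) :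
    sumL arr p = ((p : Int) + 1) * arr.getD p 0 := by
  unfold sumL
  rw [fseg_at_argmin arr 0 p p (by omega) le_rfl
      (fun j hj1 hj2 => by
        by_cases hjp : j = p
        · subst hjp; exact le_rfl
        · exact h j (by omega))]
  push_cast
  ring

theorem sumL_of_top (arr : List Int) (p t : Nat) (htp : t < p)
    (hlt : arr.getD t 0 < arr.getD p 0)
    (hgap : ∀ m, t < m → m < p → arr.getD p 0 ≤ arr.getD m 0) :
    sumL arr p = sumL arr t + ((p : Int) - (t : Int)) * arr.getD p 0 := by
  have hminle : ∀ j, j ≤ p → min p j = j := by intro j hj; omega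
  have hwge : arr.getD p 0 ≤ wmin arr (t + 1) p :=
    le_wmin arr (t + 1) p _ (by omega)
      (fun m hm1 hm2 => by
        by_cases hmp : m = p
        · subst hmp; exact le_rfl
        · exact hgap m (by omega) (by omega))
  unfold sumL fseg
  rw [sumOver_split _ 0 t p (by omega) htp]
  have h2 : sumOver (fun j => wmin arr (min p j) (max p j)) (t + 1) p =
      ((p : Int) - (t : Int)) * arr.getD p 0 := by
    rw [sumOver_congr _ (fun _ => arr.getD p 0) (t + 1) p (by omega)
        (fun j hj1 hj2 => by
          rw [show min p j = j from by omega, show max p j = p from by omega]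
          exact wmin_eq_of_argmin arr j p p (by omega) le_rfl
            (fun m hm1 hm2 => by
              by_cases hmp : m = p
              · subst hmp; exact le_rfl
              · exact hgap m (by omega) (by omega))),
      sumOver_const _ (t + 1) p (by omega)]
    push_cast
    ring
  have h1 : sumOver (fun j => wmin arr (min p j) (max p j)) 0 t =
      sumOver (fun j => wmin arr (min t j) (max t j)) 0 t := by
    apply sumOver_congr _ _ 0 t (by omega)
    intro j hj1 hj2
    rw [show min p j = j from by omega, show max p j = p from by omega,
      show min t j = j from by omega, show max t j = t from by omega]
    by_cases hjt : j = t
    · subst hjt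
      rw [wmin_split arr j j p le_rfl (by omega),
        show wmin arr j j = arr.getD j 0 from by rw [wmin, dif_neg (by omega)]]
      exact min_eq_left (le_trans (le_of_lt hlt) hwge)
    · rw [wmin_split arr j t p (by omega) (by omega)]
      have hle : wmin arr j t ≤ wmin arr (t + 1) p := by
        have := wmin_le arr j t t (by omega) le_rfl
        omega
      exact min_eq_left hle
  rw [h1, h2]

-- A's left loop computes sumL everywhere
theorem goLa_correct (arr : List Int) :
    ∀ d i left sa, arr.length - i = d → InvL arr i sa →
      left.length = arr.length → (∀ p, p < i → left.getD p 0 = sumL arr p) →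
      ∀ p, p < arr.length → (goLa arr arr.length i left sa).getD p 0 = sumL arr p := by
  intro d
  induction d with
  | zero =>
    intro i left sa hd hinv hlen hok p hp
    rw [goLa, dif_neg (by omega)]
    exact hok p (by omega)
  | succ d ih =>
    intro i left sa hd hinv hlen hok p hp
    have hi : i < arr.length := by omega
    rw [goLa, dif_pos hi]
    set x := arr.getD i 0 with hx
    have hstep := invL_step arr i sa hinv
    match hpop : popA arr x sa with
    | [] =>
      have hval : ((i : Int) + 1) * x = sumL arr i := by
        rw [sumL_of_min arr i (popA_gap_nil arr i sa hinv hpop)]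
      dsimp only
      refine ih (i + 1) (left.set i (((i : Int) + 1) * x)) [i] (by omega)
        (by rw [hpop] at hstep; exact hstep) (by simp [hlen]) ?_ p hp
      intro q hq
      by_cases hqi : q = i
      · subst hqi
        rw [getD_set_self _ _ _ _ (by omega), hval]
      · rw [getD_set_ne _ _ _ _ _ hqi]
        exact hok q (by omega)
    | t :: rest =>
      have hsuf := popA_suffix arr x sa
      rw [hpop] at hsuf
      have hti : t < i := (hinv.2.1 t (hsuf.subset (by simp))).1
      have hval : left.getD t 0 + ((i : Int) - (t : Int)) * x = sumL arr i := by
        rw [hok t hti,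
          ← sumL_of_top arr i t hti (popA_head_lt arr x sa t rest hpop)
            (popA_gap_cons arr i sa t rest hinv hpop)]
      dsimp only
      refine ih (i + 1) (left.set i (left.getD t 0 + ((i : Int) - (t : Int)) * x))
        (i :: t :: rest) (by omega)
        (by rw [hpop] at hstep; exact hstep) (by simp [hlen]) ?_ p hp
      intro q hq
      by_cases hqi : q = i
      · subst hqi
        rw [getD_set_self _ _ _ _ (by omega), hval]
      · rw [getD_set_ne _ _ _ _ _ hqi]
        exact hok q (by omega)

-- the stack invariant of A's right pass, before processing index k-1 (processed: k..n-1)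
def InvR (arr : List Int) (k : Nat) (sa : List Nat) : Prop :=
  sa.Pairwise (· < ·) ∧
  (∀ j ∈ sa, k ≤ j ∧ j < arr.length ∧ ∀ m, k ≤ m → m < j → arr.getD j 0 < arr.getD m 0) ∧
  (∀ j, k ≤ j → j < arr.length → (∀ m, k ≤ m → m < j → arr.getD j 0 < arr.getD m 0) → j ∈ sa)

theorem invR_cover (arr : List Int) (k : Nat) (sa : List Nat) (hinv : InvR arr k sa) :
    ∀ m, k ≤ m → m < arr.length → ∃ j ∈ sa, j ≤ m ∧ arr.getD j 0 ≤ arr.getD m 0 := by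
  obtain ⟨_, _, hcomp⟩ := hinv
  have H : ∀ d m, k ≤ m → m < arr.length → m - k ≤ d →
      ∃ j ∈ sa, j ≤ m ∧ arr.getD j 0 ≤ arr.getD m 0 := by
    intro d
    induction d with
    | zero =>
      intro m hm1 hm2 hd
      exact ⟨m, hcomp m hm1 hm2 (fun m' h1 h2 => by omega), le_rfl, le_rfl⟩
    | succ d ih =>
      intro m hm1 hm2 hd
      by_cases hp : ∀ m', k ≤ m' → m' < m → arr.getD m 0 < arr.getD m' 0
      · exact ⟨m, hcomp m hm1 hm2 hp, le_rfl, le_rfl⟩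
      · push_neg at hp
        obtain ⟨m', hkm', hm'm, hle⟩ := hp
        obtain ⟨j, hj, hj1, hj2⟩ := ih m' hkm' (by omega) (by omega)
        exact ⟨j, hj, by omega, le_trans hj2 hle⟩
  intro m hm1 hm2
  exact H (m - k) m hm1 hm2 le_rfl

theorem popA_gap_cons_R (arr : List Int) (i : Nat) (sa : List Nat) (t : Nat) (rest : List Nat)
    (hinv : InvR arr (i + 1) sa) (hpop : popA arr (arr.getD i 0) sa = t :: rest) :
    ∀ m, i < m → m < t → arr.getD i 0 ≤ arr.getD m 0 := by
  intro m hm1 hm2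
  have hmn : m < arr.length := by
    have := (hinv.2.1 t ((popA_suffix arr _ sa).subset (by rw [hpop]; simp))).2.1
    omega
  obtain ⟨j, hj, hj1, hj2⟩ := invR_cover arr (i + 1) sa hinv m (by omega) hmn
  have hjt : j ∉ popA arr (arr.getD i 0) sa := by
    intro hjin
    rw [hpop] at hjin
    have hsuf := popA_suffix arr (arr.getD i 0) sa
    rw [hpop] at hsuf
    have hpw : (t :: rest).Pairwise (fun a b : Nat => a < b) := hinv.1.sublist hsuf.sublist
    rcases List.mem_cons.mp hjin with rfl | hjr
    · omega
    · have := (List.pairwise_cons.mp hpw).1 j hjr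
      omega
  have := popA_popped_ge arr (arr.getD i 0) sa j hj hjt
  omega

theorem popA_gap_nil_R (arr : List Int) (i : Nat) (sa : List Nat)
    (hinv : InvR arr (i + 1) sa) (hpop : popA arr (arr.getD i 0) sa = []) :
    ∀ m, i < m → m < arr.length → arr.getD i 0 ≤ arr.getD m 0 := by
  intro m hm1 hm2
  obtain ⟨j, hj, hj1, hj2⟩ := invR_cover arr (i + 1) sa hinv m (by omega) hm2
  have hjt : j ∉ popA arr (arr.getD i 0) sa := by rw [hpop]; simp
  have := popA_popped_ge arr (arr.getD i 0) sa j hj hjt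
  omega

theorem invR_step (arr : List Int) (i : Nat) (sa : List Nat) (hin : i < arr.length)
    (hinv : InvR arr (i + 1) sa) :
    InvR arr i (i :: popA arr (arr.getD i 0) sa) := by
  obtain ⟨hpw, hsound, hcomp⟩ := hinv
  have hsuf := popA_suffix arr (arr.getD i 0) sa
  have hpw' : (popA arr (arr.getD i 0) sa).Pairwise (fun a b : Nat => a < b) :=
    hpw.sublist hsuf.sublist
  have hmem_gt : ∀ j ∈ popA arr (arr.getD i 0) sa, i < j := by
    intro j hj
    have := (hsound j (hsuf.subset hj)).1
    omega
  have hmem_val : ∀ j ∈ popA arr (arr.getD i 0) sa, arr.getD j 0 < arr.getD i 0 := by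
    intro j hj
    match hp : popA arr (arr.getD i 0) sa with
    | [] => rw [hp] at hj; simp at hj
    | t :: rest =>
      rw [hp] at hj
      have ht : arr.getD t 0 < arr.getD i 0 := popA_head_lt arr _ sa t rest hp
      rcases List.mem_cons.mp hj with rfl | hjr
      · exact ht
      · have hjt : t < j := by
          rw [hp] at hpw'
          exact (List.pairwise_cons.mp hpw').1 j hjr
        have hti : i < t := hmem_gt t (by rw [hp]; simp)
        have := (hsound j (hsuf.subset (by rw [hp]; exact List.mem_cons_of_mem _ hjr))).2.2 t (by omega) hjt
        omega
  refine ⟨?_, ?_, ?_⟩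
  · exact List.pairwise_cons.mpr ⟨fun j hj => hmem_gt j hj, hpw'⟩
  · intro j hj
    rcases List.mem_cons.mp hj with rfl | hjr
    · exact ⟨le_rfl, hin, fun m hm1 hm2 => by omega⟩
    · obtain ⟨hj1, hj2, hj3⟩ := hsound j (hsuf.subset hjr)
      refine ⟨by omega, hj2, ?_⟩
      intro m hm1 hm2
      by_cases hmi : m = i
      · subst hmi
        exact hmem_val j hjr
      · exact hj3 m (by omega) hm2
  · intro j hj1 hj2 hjp
    by_cases hji : j = i
    · subst hji; exact List.mem_cons_self
    · have hij : i < j := by omega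
      have hjin : j ∈ sa := hcomp j (by omega) hj2 (fun m hm1 hm2 => hjp m (by omega) hm2)
      have : arr.getD j 0 < arr.getD i 0 := hjp i le_rfl hij
      exact List.mem_cons_of_mem _ (popA_mem_of_lt arr _ sa j hjin this)

-- sumR recurrences
theorem sumR_of_min (arr : List Int) (p : Nat) (hp : p < arr.length)
    (h : ∀ m, p < m → m < arr.length → arr.getD p 0 ≤ arr.getD m 0) :
    sumR arr p = ((arr.length : Int) - (p : Int)) * arr.getD p 0 := by
  unfold sumR
  rw [fseg_at_argmin arr p (arr.length - 1) p le_rfl (by omega)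
      (fun j hj1 hj2 => by
        by_cases hjp : j = p
        · subst hjp; exact le_rfl
        · exact h j (by omega) (by omega))]
  push_cast [show ((arr.length - 1 : Nat) : Int) = (arr.length : Int) - 1 from by omega]
  ring

theorem sumR_of_top (arr : List Int) (p t : Nat) (htp : p < t) (htn : t < arr.length)
    (hlt : arr.getD t 0 < arr.getD p 0)
    (hgap : ∀ m, p < m → m < t → arr.getD p 0 ≤ arr.getD m 0) :
    sumR arr p = sumR arr t + ((t : Int) - (p : Int)) * arr.getD p 0 := by
  have hwge : arr.getD p 0 ≤ wmin arr p (t - 1) :=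
    le_wmin arr p (t - 1) _ (by omega)
      (fun m hm1 hm2 => by
        by_cases hmp : m = p
        · subst hmp; exact le_rfl
        · exact hgap m (by omega) (by omega))
  unfold sumR fseg
  rw [sumOver_split _ p (t - 1) (arr.length - 1) (by omega) (by omega),
    show t - 1 + 1 = t from by omega]
  have h1 : sumOver (fun j => wmin arr (min p j) (max p j)) p (t - 1) =
      ((t : Int) - (p : Int)) * arr.getD p 0 := by
    rw [sumOver_congr _ (fun _ => arr.getD p 0) p (t - 1) (by omega)
        (fun j hj1 hj2 => by
          rw [show min p j = p from by omega, show max p j = j from by omega]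
          exact wmin_eq_of_argmin arr p j p le_rfl (by omega)
            (fun m hm1 hm2 => by
              by_cases hmp : m = p
              · subst hmp; exact le_rfl
              · exact hgap m (by omega) (by omega))),
      sumOver_const _ p (t - 1) (by omega)]
    push_cast [show ((t - 1 : Nat) : Int) = (t : Int) - 1 from by omega]
    ring
  have h2 : sumOver (fun j => wmin arr (min p j) (max p j)) t (arr.length - 1) =
      sumOver (fun j => wmin arr (min t j) (max t j)) t (arr.length - 1) := by
    apply sumOver_congr _ _ t (arr.length - 1) (by omega)
    intro j hj1 hj2
    rw [show min p j = p from by omega, show max p j = j from by omega,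
      show min t j = t from by omega, show max t j = j from by omega]
    by_cases hjt : j = t
    · subst hjt
      rw [wmin_split arr p (j - 1) j (by omega) (by omega),
        show j - 1 + 1 = j from by omega,
        show wmin arr j j = arr.getD j 0 from by rw [wmin, dif_neg (by omega)]]
      exact min_eq_right (le_trans (le_of_lt hlt) hwge)
    · rw [wmin_split arr p (t - 1) j (by omega) (by omega),
        show t - 1 + 1 = t from by omega]
      have hle : wmin arr t j ≤ wmin arr p (t - 1) := by
        have := wmin_le arr t j t le_rfl (by omega)
        omega
      exact min_eq_right hle
  rw [h1, h2]
  ring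

-- A's right loop computes sumR everywhere
theorem goRa_correct (arr : List Int) :
    ∀ k right sa, k ≤ arr.length → InvR arr k sa →
      right.length = arr.length → (∀ p, k ≤ p → p < arr.length → right.getD p 0 = sumR arr p) →
      ∀ p, p < arr.length → (goRa arr arr.length k right sa).getD p 0 = sumR arr p := by
  intro k
  induction k with
  | zero =>
    intro right sa hk hinv hlen hok p hp
    rw [goRa]
    exact hok p (by omega) hp
  | succ i ih =>
    intro right sa hk hinv hlen hok p hp
    rw [goRa]
    set x := arr.getD i 0 with hx
    have hin : i < arr.length := by omega
    have hstep := invR_step arr i sa hin hinv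
    match hpop : popA arr x sa with
    | [] =>
      have hval : ((arr.length : Int) - (i : Int)) * x = sumR arr i := by
        rw [sumR_of_min arr i hin (popA_gap_nil_R arr i sa hinv hpop)]
      dsimp only
      refine ih (right.set i (((arr.length : Int) - (i : Int)) * x)) [i]
        (by omega) (by rw [hpop] at hstep; exact hstep) (by simp [hlen]) ?_ p hp
      intro q hq1 hq2
      by_cases hqi : q = i
      · subst hqi
        rw [getD_set_self _ _ _ _ (by omega), hval]
      · rw [getD_set_ne _ _ _ _ _ hqi]
        exact hok q (by omega) hq2
    | t :: rest =>
      have hsuf := popA_suffix arr x sa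
      rw [hpop] at hsuf
      obtain ⟨hti, htn, _⟩ := hinv.2.1 t (hsuf.subset (by simp))
      have hval : right.getD t 0 + ((t : Int) - (i : Int)) * x = sumR arr i := by
        rw [hok t hti htn,
          ← sumR_of_top arr i t (by omega) htn (popA_head_lt arr x sa t rest hpop)
            (popA_gap_cons_R arr i sa t rest hinv hpop)]
      dsimp only
      refine ih (right.set i (right.getD t 0 + ((t : Int) - (i : Int)) * x))
        (i :: t :: rest) (by omega)
        (by rw [hpop] at hstep; exact hstep) (by simp [hlen]) ?_ p hp
      intro q hq1 hq2
      by_cases hqi : q = i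
      · subst hqi
        rw [getD_set_self _ _ _ _ (by omega), hval]
      · rw [getD_set_ne _ _ _ _ _ hqi]
        exact hok q (by omega) hq2

-- fold of max over range = max 0 (maxOver …)
theorem foldl_max_range (g : Nat → Int) :
    ∀ n c, 0 < n →
      (List.range n).foldl (fun a i => max a (g i)) c = max c (maxOver g 0 (n - 1)) := by
  intro n
  induction n with
  | zero => intro c h; omega
  | succ n ih =>
    intro c h
    by_cases hn : n = 0
    · subst hn
      simp only [List.range_succ, List.range_zero, List.nil_append, List.foldl_cons,
        List.foldl_nil]
      rw [show (0 + 1 - 1 : Nat) = 0 from rfl, maxOver, dif_neg (by omega)]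
    · rw [List.range_succ, List.foldl_append, ih c (by omega)]
      simp only [List.foldl_cons, List.foldl_nil]
      rw [show n + 1 - 1 = n from by omega,
        maxOver_split g 0 (n - 1) n (by omega) (by omega),
        show n - 1 + 1 = n from by omega,
        show maxOver g n n = g n from by rw [maxOver, dif_neg (by omega)]]
      rw [max_assoc]

theorem fseg_whole (arr : List Int) (i : Nat) (hi : i < arr.length) :
    fseg arr i 0 (arr.length - 1) = sumL arr i + sumR arr i - arr.getD i 0 := by
  by_cases hi0 : i = 0
  · subst hi0
    have : sumL arr 0 = arr.getD 0 0 := by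
      unfold sumL fseg
      rw [sumOver, dif_neg (by omega),
        show min 0 0 = 0 from rfl, show max 0 0 = 0 from rfl, wmin, dif_neg (by omega)]
    unfold sumR
    rw [this]
    ring
  · have hsplit : fseg arr i 0 (arr.length - 1) =
        sumOver (fun j => wmin arr (min i j) (max i j)) 0 (i - 1) +
        sumOver (fun j => wmin arr (min i j) (max i j)) i (arr.length - 1) := by
      unfold fseg
      rw [sumOver_split _ 0 (i - 1) (arr.length - 1) (by omega) (by omega),
        show i - 1 + 1 = i from by omega]
    have hL : sumL arr i =
        sumOver (fun j => wmin arr (min i j) (max i j)) 0 (i - 1) + arr.getD i 0 := by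
      unfold sumL fseg
      rw [sumOver_split _ 0 (i - 1) i (by omega) (by omega),
        show i - 1 + 1 = i from by omega,
        show sumOver (fun j => wmin arr (min i j) (max i j)) i i =
          wmin arr (min i i) (max i i) from by rw [sumOver, dif_neg (by omega)]]
      rw [show min i i = i from by omega, show max i i = i from by omega,
        show wmin arr i i = arr.getD i 0 from by rw [wmin, dif_neg (by omega)]]
    have hR : sumR arr i = sumOver (fun j => wmin arr (min i j) (max i j)) i (arr.length - 1) := by
      unfold sumR fseg
      rfl
    rw [hsplit, hR]
    omega

theorem solve_eq_spec (arr : List Int) :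
    solve arr = if arr.length = 0 then 0 else max 0 (bestSeg arr 0 (arr.length - 1)) := by
  by_cases h0 : arr.length = 0
  · rw [if_pos h0]
    unfold solve
    rw [h0]
    simp
  · rw [if_neg h0]
    unfold solve
    have hL := goLa_correct arr arr.length 0 (List.replicate arr.length 0) [] (by omega)
      ⟨List.Pairwise.nil, by simp, by omega⟩ (by simp) (by omega)
    have hR := goRa_correct arr arr.length (List.replicate arr.length 0) [] le_rfl
      ⟨List.Pairwise.nil, by simp, by intro j h1 h2 h3; omega⟩ (by simp) (by omega)
    have hcongr : (List.range arr.length).foldl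
        (fun ans i =>
          max ans ((goLa arr arr.length 0 (List.replicate arr.length 0) []).getD i 0 +
                   (goRa arr arr.length arr.length (List.replicate arr.length 0) []).getD i 0 -
                   arr.getD i 0)) 0 =
        (List.range arr.length).foldl
          (fun ans i => max ans (fseg arr i 0 (arr.length - 1))) 0 := by
      have H : ∀ (l : List Nat), (∀ i ∈ l, i < arr.length) → ∀ c : Int,
          l.foldl (fun ans i =>
            max ans ((goLa arr arr.length 0 (List.replicate arr.length 0) []).getD i 0 +
                     (goRa arr arr.length arr.length (List.replicate arr.length 0) []).getD i 0 -
                     arr.getD i 0)) c =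
          l.foldl (fun ans i => max ans (fseg arr i 0 (arr.length - 1))) c := by
        intro l
        induction l with
        | nil => intro _ c; rfl
        | cons a l ihl =>
          intro hmem c
          simp only [List.foldl_cons]
          rw [hL a (hmem a (by simp)), hR a (hmem a (by simp)),
            ← fseg_whole arr a (hmem a (by simp))]
          exact ihl (fun i hi => hmem i (List.mem_cons_of_mem _ hi)) _
      exact H (List.range arr.length) (fun i hi => List.mem_range.mp hi) 0
    rw [hcongr, foldl_max_range _ arr.length 0 (by omega)]
    rfl

-- ---------- B-side: the merge sweep computes bestSeg ----------

-- maximal run of inserted positions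
def MaxRun (P : List Int) (n lo hi : Nat) : Prop :=
  lo ≤ hi ∧ hi < n ∧ (∀ m : Nat, lo ≤ m → m ≤ hi → (m : Int) ∈ P) ∧
  (lo = 0 ∨ ((lo : Int) - 1) ∉ P) ∧ (hi = n - 1 ∨ ((hi : Int) + 1) ∉ P)

-- the state invariant of B's sweep: runs carry length and best at both endpoints
def InvB (arr : List Int) (P : List Int) (size best : List Int) : Prop :=
  size.length = arr.length ∧ best.length = arr.length ∧
  (∀ p : Nat, p < arr.length → ((p : Int) ∉ P) → size.getD p 0 = 0) ∧
  (∀ lo hi : Nat, MaxRun P arr.length lo hi →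
    size.getD lo 0 = (hi : Int) + 1 - (lo : Int) ∧
    size.getD hi 0 = (hi : Int) + 1 - (lo : Int) ∧
    best.getD lo 0 = bestSeg arr lo hi ∧ best.getD hi 0 = bestSeg arr lo hi)

theorem runExtendLeft (P : List Int) :
    ∀ m : Nat, (m : Int) ∈ P →
      ∃ lo, lo ≤ m ∧ (∀ q : Nat, lo ≤ q → q ≤ m → (q : Int) ∈ P) ∧
        (lo = 0 ∨ ((lo : Int) - 1) ∉ P) := by
  intro m
  induction m with
  | zero =>
    intro h
    exact ⟨0, le_rfl, fun q h1 h2 => by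
      have : q = 0 := by omega
      subst this; exact h, Or.inl rfl⟩
  | succ m ih =>
    intro hm
    by_cases hp : ((m : Nat) : Int) ∈ P
    · obtain ⟨lo, h1, h2, h3⟩ := ih hp
      refine ⟨lo, by omega, ?_, h3⟩
      intro q hq1 hq2
      by_cases hq : q = m + 1
      · subst hq; exact hm
      · exact h2 q hq1 (by omega)
    · refine ⟨m + 1, le_rfl, ?_, Or.inr ?_⟩
      · intro q hq1 hq2
        have : q = m + 1 := by omega
        subst this; exact hm
      · intro hc
        apply hp
        have : ((m + 1 : Nat) : Int) - 1 = ((m : Nat) : Int) := by push_cast; ring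
        rwa [this] at hc

theorem runExtendRight (P : List Int) (n : Nat) :
    ∀ m : Nat, m < n → (m : Int) ∈ P →
      ∃ hi, m ≤ hi ∧ hi < n ∧ (∀ q : Nat, m ≤ q → q ≤ hi → (q : Int) ∈ P) ∧
        (hi = n - 1 ∨ ((hi : Int) + 1) ∉ P) := by
  have H : ∀ d m, m < n → (m : Int) ∈ P → n - 1 - m ≤ d →
      ∃ hi, m ≤ hi ∧ hi < n ∧ (∀ q : Nat, m ≤ q → q ≤ hi → (q : Int) ∈ P) ∧
        (hi = n - 1 ∨ ((hi : Int) + 1) ∉ P) := by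
    intro d
    induction d with
    | zero =>
      intro m hm hmem hd
      refine ⟨m, le_rfl, hm, fun q h1 h2 => by
        have : q = m := by omega
        subst this; exact hmem, Or.inl (by omega)⟩
    | succ d ih =>
      intro m hm hmem hd
      by_cases hp : ((m + 1 : Nat) : Int) ∈ P
      · by_cases hmn : m + 1 < n
        · obtain ⟨hi, h1, h2, h3, h4⟩ := ih (m + 1) hmn hp (by omega)
          refine ⟨hi, by omega, h2, ?_, h4⟩
          intro q hq1 hq2
          by_cases hq : q = m
          · subst hq; exact hmem
          · exact h3 q (by omega) hq2
        · exact ⟨m, le_rfl, hm, fun q h1 h2 => by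
            have : q = m := by omega
            subst this; exact hmem, Or.inl (by omega)⟩
      · refine ⟨m, le_rfl, hm, fun q h1 h2 => by
          have : q = m := by omega
          subst this; exact hmem, Or.inr ?_⟩
        intro hc
        apply hp
        have : ((m + 1 : Nat) : Int) = ((m : Nat) : Int) + 1 := by push_cast; ring
        rwa [this]
  intro m hm hmem
  exact H (n - 1 - m) m hm hmem le_rfl

theorem runExists (P : List Int) (n : Nat) (m : Nat) (hm : m < n) (hmem : (m : Int) ∈ P) :
    ∃ lo hi, MaxRun P n lo hi ∧ lo ≤ m ∧ m ≤ hi := by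
  obtain ⟨lo, hl1, hl2, hl3⟩ := runExtendLeft P m hmem
  obtain ⟨hi, hr1, hr2, hr3, hr4⟩ := runExtendRight P n m hm hmem
  refine ⟨lo, hi, ⟨by omega, hr2, ?_, hl3, hr4⟩, hl1, hr1⟩
  intro q hq1 hq2
  by_cases hq : q ≤ m
  · exact hl2 q hq1 hq
  · exact hr3 q (by omega) hq2

theorem runUnique (P : List Int) (n : Nat) (lo hi lo' hi' m : Nat)
    (h1 : MaxRun P n lo hi) (h2 : MaxRun P n lo' hi')
    (hm1 : lo ≤ m) (hm2 : m ≤ hi) (hm3 : lo' ≤ m) (hm4 : m ≤ hi') :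
    lo = lo' ∧ hi = hi' := by
  obtain ⟨ha1, ha2, ha3, ha4, ha5⟩ := h1
  obtain ⟨hb1, hb2, hb3, hb4, hb5⟩ := h2
  constructor
  · by_contra hne
    rcases Nat.lt_or_ge lo lo' with hlt | hge
    · have hmem : ((lo' - 1 : Nat) : Int) ∈ P := ha3 (lo' - 1) (by omega) (by omega)
      rcases hb4 with h0 | hnot
      · omega
      · apply hnot
        have : ((lo' : Nat) : Int) - 1 = ((lo' - 1 : Nat) : Int) := by omega
        rwa [this]
    · have hlt' : lo' < lo := by omega
      have hmem : ((lo - 1 : Nat) : Int) ∈ P := hb3 (lo - 1) (by omega) (by omega)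
      rcases ha4 with h0 | hnot
      · omega
      · apply hnot
        have : ((lo : Nat) : Int) - 1 = ((lo - 1 : Nat) : Int) := by omega
        rwa [this]
  · by_contra hne
    rcases Nat.lt_or_ge hi hi' with hlt | hge
    · have hmem : ((hi + 1 : Nat) : Int) ∈ P := hb3 (hi + 1) (by omega) (by omega)
      rcases ha5 with h0 | hnot
      · omega
      · apply hnot
        have : ((hi : Nat) : Int) + 1 = ((hi + 1 : Nat) : Int) := by push_cast; ring
        rwa [this]
    · have hlt' : hi' < hi := by omega
      have hmem : ((hi' + 1 : Nat) : Int) ∈ P := ha3 (hi' + 1) (by omega) (by omega)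
      rcases hb5 with h0 | hnot
      · omega
      · apply hnot
        have : ((hi' : Nat) : Int) + 1 = ((hi' + 1 : Nat) : Int) := by push_cast; ring
        rwa [this]

theorem getD_setset_at (l : List Int) (i j : Nat) (v d : Int) (hi : i < l.length)
    (hj : j < l.length) :
    ((l.set i v).set j v).getD i d = v ∧ ((l.set i v).set j v).getD j d = v := by
  constructor
  · by_cases hij : i = j
    · subst hij
      exact getD_set_self _ _ _ _ (by simpa using hi)
    · rw [getD_set_ne _ _ _ _ _ (by omega)]
      exact getD_set_self _ _ _ _ hi
  · exact getD_set_self _ _ _ _ (by simpa using hj)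

theorem getD_setset_other (l : List Int) (i j q : Nat) (v d : Int) (h1 : q ≠ i) (h2 : q ≠ j) :
    ((l.set i v).set j v).getD q d = l.getD q d := by
  rw [getD_set_ne _ _ _ _ _ h2, getD_set_ne _ _ _ _ _ h1]

-- one merge step of B preserves the invariant
theorem stepB_preserves (arr : List Int) (P : List Int) (size best : List Int) (kn : Nat)
    (hinv : InvB arr P size best) (hkn : kn < arr.length) (hkP : ((kn : Int)) ∉ P)
    (hmin : ∀ x ∈ P, PySem.List.pyGetD arr (kn : Int) 0 ≤ PySem.List.pyGetD arr x 0) :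
    InvB arr (P ++ [(kn : Int)])
      (stepB arr (arr.length : Int) (size, best) (kn : Int)).1
      (stepB arr (arr.length : Int) (size, best) (kn : Int)).2 := by
  obtain ⟨hls, hlb, hZ, hRuns⟩ := hinv
  have hv : PySem.List.pyGetD arr ((kn : Nat) : Int) 0 = arr.getD kn 0 :=
    PySem.List.pyGetD_natCast arr kn 0
  -- analyse the run just left of kn
  have hleft : ∃ loN : Nat, loN ≤ kn ∧
      (∀ q : Nat, loN ≤ q → q < kn → (q : Int) ∈ P) ∧
      (loN = 0 ∨ ((loN : Int) - 1) ∉ P) ∧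
      (if ((kn : Nat) : Int) > 0 then PySem.List.pyGetD size (((kn : Nat) : Int) - 1) 0 else 0) =
        (kn : Int) - (loN : Int) ∧
      (loN < kn → best.getD loN 0 = bestSeg arr loN (kn - 1)) := by
    by_cases h1 : 0 < kn ∧ ((kn : Int) - 1) ∈ P
    · obtain ⟨hk1, hmem⟩ := h1
      have hmem' : ((kn - 1 : Nat) : Int) ∈ P := by
        have hc : ((kn - 1 : Nat) : Int) = (kn : Int) - 1 := by omega
        rwa [hc]
      obtain ⟨lo, hi, hrun, hlo, hhi⟩ := runExists P arr.length (kn - 1) (by omega) hmem'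
      have hhi' : hi = kn - 1 := by
        by_contra hne
        exact hkP (hrun.2.2.1 kn (by omega) (by omega))
      subst hhi'
      have hvals := hRuns lo (kn - 1) hrun
      refine ⟨lo, by omega, ?_, hrun.2.2.2.1, ?_, fun _ => hvals.2.2.1⟩
      · intro q hq1 hq2
        exact hrun.2.2.1 q hq1 (by omega)
      · rw [if_pos (by exact_mod_cast Int.natCast_pos.mpr hk1),
          show ((kn : Nat) : Int) - 1 = ((kn - 1 : Nat) : Int) from by omega,
          PySem.List.pyGetD_natCast, hvals.2.1]
        omega
    · refine ⟨kn, le_rfl, fun q hq1 hq2 => absurd hq2 (by omega), ?_, ?_, fun h => absurd h (by omega)⟩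
      · by_cases hk0 : kn = 0
        · exact Or.inl hk0
        · exact Or.inr (fun hc => h1 ⟨by omega, hc⟩)
      · by_cases hk0 : kn = 0
        · rw [if_neg (by omega)]
          omega
        · rw [if_pos (by exact_mod_cast Int.natCast_pos.mpr (by omega : 0 < kn)),
            show ((kn : Nat) : Int) - 1 = ((kn - 1 : Nat) : Int) from by omega,
            PySem.List.pyGetD_natCast,
            hZ (kn - 1) (by omega) (fun hc => h1 ⟨by omega, by
              have hc2 : ((kn - 1 : Nat) : Int) = (kn : Int) - 1 := by omega
              rwa [hc2] at hc⟩)]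
          omega
  -- analyse the run just right of kn
  have hright : ∃ hiN : Nat, kn ≤ hiN ∧ hiN < arr.length ∧
      (∀ q : Nat, kn < q → q ≤ hiN → (q : Int) ∈ P) ∧
      (hiN = arr.length - 1 ∨ ((hiN : Int) + 1) ∉ P) ∧
      (if ((kn : Nat) : Int) + 1 < (arr.length : Int) then
        PySem.List.pyGetD size (((kn : Nat) : Int) + 1) 0 else 0) = (hiN : Int) - (kn : Int) ∧
      (kn < hiN → best.getD hiN 0 = bestSeg arr (kn + 1) hiN) := by
    by_cases h1 : kn + 1 < arr.length ∧ ((kn + 1 : Nat) : Int) ∈ P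
    · obtain ⟨hk1, hmem⟩ := h1
      obtain ⟨lo, hi, hrun, hlo, hhi⟩ := runExists P arr.length (kn + 1) (by omega) hmem
      have hlo' : lo = kn + 1 := by
        by_contra hne
        exact hkP (hrun.2.2.1 kn (by omega) (by omega))
      subst hlo'
      have hvals := hRuns (kn + 1) hi hrun
      refine ⟨hi, by omega, hrun.2.1, ?_, hrun.2.2.2.2, ?_, fun _ => hvals.2.2.2⟩
      · intro q hq1 hq2
        exact hrun.2.2.1 q (by omega) hq2
      · rw [if_pos (by omega),
          show ((kn : Nat) : Int) + 1 = ((kn + 1 : Nat) : Int) from by omega,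
          PySem.List.pyGetD_natCast, hvals.1]
        omega
    · refine ⟨kn, le_rfl, hkn, fun q hq1 hq2 => absurd hq1 (by omega), ?_, ?_,
        fun h => absurd h (by omega)⟩
      · by_cases hk0 : kn = arr.length - 1
        · exact Or.inl hk0
        · refine Or.inr (fun hc => h1 ⟨by omega, by
            have hc2 : ((kn + 1 : Nat) : Int) = (kn : Int) + 1 := by omega
            rwa [hc2]⟩)
      · by_cases hk0 : kn + 1 < arr.length
        · rw [if_pos (by omega),
            show ((kn : Nat) : Int) + 1 = ((kn + 1 : Nat) : Int) from by omega,
            PySem.List.pyGetD_natCast,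
            hZ (kn + 1) (by omega) (fun hc => h1 ⟨by omega, hc⟩)]
          omega
        · rw [if_neg (by omega)]
          omega
  obtain ⟨loN, hloN, hlmem, hlbound, hszL, hlbest⟩ := hleft
  obtain ⟨hiN, hhiN, hiNn, hrmem, hrbound, hszR, hrbest⟩ := hright
  -- the argmin property of kn on the merged segment
  have hm : ∀ j, loN ≤ j → j ≤ hiN → arr.getD kn 0 ≤ arr.getD j 0 := by
    intro j hj1 hj2
    rcases Nat.lt_trichotomy j kn with hlt | heq | hgt
    · have := hmin ((j : Nat) : Int) (hlmem j hj1 hlt)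
      rwa [hv, PySem.List.pyGetD_natCast] at this
    · subst heq; exact le_rfl
    · have := hmin ((j : Nat) : Int) (hrmem j hgt hj2)
      rwa [hv, PySem.List.pyGetD_natCast] at this
  have hcomb := bestSeg_combine arr loN hiN kn hloN hhiN hm
  dsimp only at hcomb
  -- the step's two result lists in closed form
  have he1 : (stepB arr (arr.length : Int) (size, best) (kn : Int)).1 =
      (size.set loN ((hiN : Int) + 1 - (loN : Int))).set hiN ((hiN : Int) + 1 - (loN : Int)) := by
    simp only [stepB]
    rw [hszL, hszR,
      show ((kn : Int) - ((kn : Int) - (loN : Int))) = ((loN : Nat) : Int) from by ring,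
      show ((kn : Int) + ((hiN : Int) - (kn : Int))) = ((hiN : Nat) : Int) from by ring,
      show (((kn : Int) - (loN : Int)) + ((hiN : Int) - (kn : Int)) + 1) =
        ((hiN : Int) + 1 - (loN : Int)) from by ring,
      PySem.List.pySetD_natCast, PySem.List.pySetD_natCast]
  have he2 : (stepB arr (arr.length : Int) (size, best) (kn : Int)).2 =
      (best.set loN (bestSeg arr loN hiN)).set hiN (bestSeg arr loN hiN) := by
    simp only [stepB]
    rw [hszL, hszR, hv,
      show ((kn : Int) - ((kn : Int) - (loN : Int))) = ((loN : Nat) : Int) from by ring,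
      show ((kn : Int) + ((hiN : Int) - (kn : Int))) = ((hiN : Nat) : Int) from by ring,
      PySem.List.pyGetD_natCast, PySem.List.pyGetD_natCast,
      PySem.List.pySetD_natCast, PySem.List.pySetD_natCast]
    have hb2 :
        (if (hiN : Int) - (kn : Int) > 0 then
          max
            (if (kn : Int) - (loN : Int) > 0 then
              max (arr.getD kn 0 * ((kn : Int) - (loN : Int) + ((hiN : Int) - (kn : Int)) + 1))
                (best.getD loN 0 + arr.getD kn 0 * ((hiN : Int) - (kn : Int) + 1))
            else arr.getD kn 0 * ((kn : Int) - (loN : Int) + ((hiN : Int) - (kn : Int)) + 1))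
            (best.getD hiN 0 + arr.getD kn 0 * ((kn : Int) - (loN : Int) + 1))
        else
          (if (kn : Int) - (loN : Int) > 0 then
            max (arr.getD kn 0 * ((kn : Int) - (loN : Int) + ((hiN : Int) - (kn : Int)) + 1))
              (best.getD loN 0 + arr.getD kn 0 * ((hiN : Int) - (kn : Int) + 1))
          else arr.getD kn 0 * ((kn : Int) - (loN : Int) + ((hiN : Int) - (kn : Int)) + 1))) =
        bestSeg arr loN hiN := by
      rw [hcomb]
      by_cases hc1 : loN < kn
      · rw [if_pos (by omega : (kn : Int) - (loN : Int) > 0), if_pos hc1,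
          hlbest hc1,
          show (arr.getD kn 0 * ((kn : Int) - (loN : Int) + ((hiN : Int) - (kn : Int)) + 1)) =
            arr.getD kn 0 * ((hiN : Int) + 1 - (loN : Int)) from by ring,
          show (arr.getD kn 0 * ((hiN : Int) - (kn : Int) + 1)) =
            arr.getD kn 0 * ((hiN : Int) + 1 - (kn : Int)) from by ring]
        by_cases hc2 : kn < hiN
        · rw [if_pos (by omega : (hiN : Int) - (kn : Int) > 0), if_pos hc2, hrbest hc2,
            show (arr.getD kn 0 * ((kn : Int) - (loN : Int) + 1)) =
              arr.getD kn 0 * ((kn : Int) + 1 - (loN : Int)) from by ring]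
        · rw [if_neg (by omega : ¬((hiN : Int) - (kn : Int) > 0)), if_neg hc2]
      · rw [if_neg (by omega : ¬((kn : Int) - (loN : Int) > 0)), if_neg hc1,
          show (arr.getD kn 0 * ((kn : Int) - (loN : Int) + ((hiN : Int) - (kn : Int)) + 1)) =
            arr.getD kn 0 * ((hiN : Int) + 1 - (loN : Int)) from by ring]
        by_cases hc2 : kn < hiN
        · rw [if_pos (by omega : (hiN : Int) - (kn : Int) > 0), if_pos hc2, hrbest hc2,
            show (arr.getD kn 0 * ((kn : Int) - (loN : Int) + 1)) =
              arr.getD kn 0 * ((kn : Int) + 1 - (loN : Int)) from by ring]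
        · rw [if_neg (by omega : ¬((hiN : Int) - (kn : Int) > 0)), if_neg hc2]
    rw [hb2]
  -- merged run in the new processed set
  have hlo_mem' : ((loN : Int)) ∈ P ++ [((kn : Nat) : Int)] := by
    by_cases hc : loN < kn
    · exact List.mem_append_left _ (hlmem loN le_rfl hc)
    · have : loN = kn := by omega
      subst this
      exact List.mem_append_right _ (List.mem_cons.mpr (Or.inl rfl))
  have hhi_mem' : ((hiN : Int)) ∈ P ++ [((kn : Nat) : Int)] := by
    by_cases hc : kn < hiN
    · exact List.mem_append_left _ (hrmem hiN hc le_rfl)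
    · have : hiN = kn := by omega
      subst this
      exact List.mem_append_right _ (List.mem_cons.mpr (Or.inl rfl))
  have hmerged : MaxRun (P ++ [((kn : Nat) : Int)]) arr.length loN hiN := by
    refine ⟨by omega, hiNn, ?_, ?_, ?_⟩
    · intro m hm1 hm2
      rcases Nat.lt_trichotomy m kn with hlt | heq | hgt
      · exact List.mem_append_left _ (hlmem m hm1 hlt)
      · subst heq
        exact List.mem_append_right _ (List.mem_cons.mpr (Or.inl rfl))
      · exact List.mem_append_left _ (hrmem m hgt hm2)
    · rcases hlbound with h0 | hnot
      · exact Or.inl h0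
      · refine Or.inr (fun hc => ?_)
        rcases List.mem_append.mp hc with hcP | hck
        · exact hnot hcP
        · have := List.mem_singleton.mp hck
          omega
    · rcases hrbound with h0 | hnot
      · exact Or.inl h0
      · refine Or.inr (fun hc => ?_)
        rcases List.mem_append.mp hc with hcP | hck
        · exact hnot hcP
        · have := List.mem_singleton.mp hck
          omega
  refine ⟨?_, ?_, ?_, ?_⟩
  · rw [he1]; simpa using hls
  · rw [he2]; simpa using hlb
  · intro p hp hpP'
    have hpP : ((p : Int)) ∉ P := fun hc => hpP' (List.mem_append_left _ hc)
    have hplo : p ≠ loN := fun hc => hpP' (hc ▸ hlo_mem')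
    have hphi : p ≠ hiN := fun hc => hpP' (hc ▸ hhi_mem')
    rw [he1, getD_setset_other _ _ _ _ _ _ hplo hphi]
    exact hZ p hp hpP
  · intro a b hrun'
    by_cases hk_in : a ≤ kn ∧ kn ≤ b
    · obtain ⟨ha, hb⟩ := runUnique (P ++ [((kn : Nat) : Int)]) arr.length a b loN hiN kn
        hrun' hmerged hk_in.1 hk_in.2 hloN hhiN
      subst ha; subst hb
      have h1 := getD_setset_at size a b ((b : Int) + 1 - (a : Int)) 0
        (by omega) (by omega)
      have h2 := getD_setset_at best a b (bestSeg arr a b) 0 (by omega) (by omega)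
      rw [he1, he2]
      exact ⟨h1.1, h1.2, h2.1, h2.2⟩
    · have hnlo : ¬(a ≤ loN ∧ loN ≤ b) := by
        intro hc
        obtain ⟨ha, hb⟩ := runUnique (P ++ [((kn : Nat) : Int)]) arr.length a b loN hiN loN
          hrun' hmerged hc.1 hc.2 le_rfl (by omega)
        exact hk_in ⟨by omega, by omega⟩
      have hnhi : ¬(a ≤ hiN ∧ hiN ≤ b) := by
        intro hc
        obtain ⟨ha, hb⟩ := runUnique (P ++ [((kn : Nat) : Int)]) arr.length a b loN hiN hiN
          hrun' hmerged hc.1 hc.2 (by omega) le_rfl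
        exact hk_in ⟨by omega, by omega⟩
      have hab := hrun'.1
      have halo : a ≠ loN := fun hc => hnlo ⟨by omega, by omega⟩
      have hahi : a ≠ hiN := fun hc => hnhi ⟨by omega, by omega⟩
      have hblo : b ≠ loN := fun hc => hnlo ⟨by omega, by omega⟩
      have hbhi : b ≠ hiN := fun hc => hnhi ⟨by omega, by omega⟩
      have hold : MaxRun P arr.length a b := by
        refine ⟨hrun'.1, hrun'.2.1, ?_, ?_, ?_⟩
        · intro m hm1 hm2
          rcases List.mem_append.mp (hrun'.2.2.1 m hm1 hm2) with hma | hmk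
          · exact hma
          · have := List.mem_singleton.mp hmk
            have : m = kn := by omega
            subst this
            exact absurd ⟨hm1, hm2⟩ hk_in
        · rcases hrun'.2.2.2.1 with h0 | hnot
          · exact Or.inl h0
          · exact Or.inr (fun hc => hnot (List.mem_append_left _ hc))
        · rcases hrun'.2.2.2.2 with h0 | hnot
          · exact Or.inl h0
          · exact Or.inr (fun hc => hnot (List.mem_append_left _ hc))
      obtain ⟨v1, v2, v3, v4⟩ := hRuns a b hold
      rw [he1, he2, getD_setset_other _ _ _ _ _ _ halo hahi,
        getD_setset_other _ _ _ _ _ _ hblo hbhi,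
        getD_setset_other _ _ _ _ _ _ halo hahi,
        getD_setset_other _ _ _ _ _ _ hblo hbhi]
      exact ⟨v1, v2, v3, v4⟩

theorem foldB (arr : List Int) :
    ∀ R P size best,
      ((P ++ R).Pairwise (fun a b => PySem.List.pyGetD arr b 0 ≤ PySem.List.pyGetD arr a 0)) →
      (P ++ R).Nodup →
      (∀ x ∈ R, 0 ≤ x ∧ x < (arr.length : Int)) →
      InvB arr P size best →
      InvB arr (P ++ R) (R.foldl (stepB arr (arr.length : Int)) (size, best)).1
        (R.foldl (stepB arr (arr.length : Int)) (size, best)).2 := by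
  intro R
  induction R with
  | nil =>
    intro P size best _ _ _ hinv
    rw [List.append_nil]
    exact hinv
  | cons k R' ih =>
    intro P size best hpw hnd hrange hinv
    obtain ⟨kn, rfl⟩ : ∃ kn : Nat, k = (kn : Int) :=
      ⟨k.toNat, by have := (hrange k (by simp)).1; omega⟩
    have hkn : kn < arr.length := by
      have := (hrange ((kn : Nat) : Int) (by simp)).2
      omega
    have hkP : ((kn : Int)) ∉ P := by
      intro hc
      have := (List.nodup_append.mp hnd).2.2
      exact absurd rfl (this _ hc _ (List.mem_cons.mpr (Or.inl rfl)))
    have hmin : ∀ x ∈ P, PySem.List.pyGetD arr (kn : Int) 0 ≤ PySem.List.pyGetD arr x 0 := by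
      intro x hx
      have hap := List.pairwise_append.mp hpw
      exact hap.2.2 x hx _ (List.mem_cons.mpr (Or.inl rfl))
    have hstep := stepB_preserves arr P size best kn hinv hkn hkP hmin
    have hres := ih (P ++ [(kn : Int)])
      (stepB arr (arr.length : Int) (size, best) (kn : Int)).1
      (stepB arr (arr.length : Int) (size, best) (kn : Int)).2
      (by rwa [List.append_assoc, List.singleton_append])
      (by rwa [List.append_assoc, List.singleton_append])
      (fun x hx => hrange x (by simp [hx]))
      hstep
    rw [Prod.mk.eta] at hres
    rw [List.append_assoc, List.singleton_append] at hres
    simpa [List.foldl_cons] using hres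

theorem solve_alt_eq_spec (arr : List Int) :
    solve_alt arr = if arr.length = 0 then 0 else max 0 (bestSeg arr 0 (arr.length - 1)) := by
  by_cases h0 : arr.length = 0
  · rw [if_pos h0]
    unfold solve_alt
    rw [if_neg (by omega)]
  · rw [if_neg h0]
    unfold solve_alt
    rw [if_pos (by omega)]
    set order := PySem.List.sorted (PySem.List.pyRange 0 (arr.length : Int) 1)
      (fun i => PySem.List.pyGetD arr i 0) true with horder
    have hperm := PySem.List.sorted_perm (PySem.List.pyRange 0 (arr.length : Int) 1)
      (fun i => PySem.List.pyGetD arr i 0) true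
    have hpw : order.Pairwise (fun a b => PySem.List.pyGetD arr b 0 ≤ PySem.List.pyGetD arr a 0) :=
      PySem.List.sorted_pairwise_rev _ _
    have hnd : order.Nodup := hperm.nodup_iff.mpr (PySem.List.nodup_pyRange_one 0 (arr.length : Int))
    have hrange : ∀ x ∈ order, 0 ≤ x ∧ x < (arr.length : Int) := by
      intro x hx
      have := hperm.mem_iff.mp hx
      exact PySem.List.mem_pyRange_one.mp this
    have hfold := foldB arr order [] (List.replicate arr.length 0) (List.replicate arr.length 0)
      (by simpa using hpw) (by simpa using hnd) hrange
      ⟨by simp, by simp, fun p hp _ => List.getD_replicate _ hp, ?_⟩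
    · obtain ⟨hl1, hl2, hZ, hRuns⟩ := hfold
      have hmemall : ∀ m : Nat, m < arr.length → (m : Int) ∈ ([] ++ order : List Int) := by
        intro m hm
        simp only [List.nil_append]
        rw [horder, PySem.List.mem_sorted]
        exact PySem.List.mem_pyRange_one.mpr ⟨by omega, by omega⟩
      have hrun : MaxRun ([] ++ order) arr.length 0 (arr.length - 1) :=
        ⟨by omega, by omega, fun m h1 h2 => hmemall m (by omega), Or.inl rfl, Or.inl rfl⟩
      have := (hRuns 0 (arr.length - 1) hrun).2.2.1
      rw [PySem.List.pyGetD_of_nonneg _ 0 le_rfl, Int.toNat_zero, this]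
    · intro lo hi hrun
      exact absurd ((hrun.2.2.1 lo le_rfl hrun.1)) (by simp)

-- ===== VERDICT (by name: the statement is the Claim_ definition above) =====
theorem solve_spec : Claim_equal_solve := by
  intro arr _
  unfold Spec_solve
  rw [solve_eq_spec, solve_alt_eq_spec]
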